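-- pv_equiv track=rewrite | github.com/devuming/al_python | 2023.10/프로그래머스_숫자카드나누기.py | solution
-- ===== SOURCE A (Python) =====
-- def gcd(a, b):
--     if a % b == 0:
--         return b
--     return gcd(b, a % b)
--
-- def isDivisible(gcd, arr):
--     for num in arr:
--         if num % gcd == 0:
--             return True
--     return False
--
-- def solution(arrayA, arrayB):
--     answer = 0
--     gcd_a = arrayA[0]
--     gcd_b = arrayB[0]
--     for i in range(1, len(arrayA)):
--         gcd_a = gcd(gcd_a, arrayA[i])
--
--     for i in range(1, len(arrayB)):
--         gcd_b = gcd(gcd_b, arrayB[i])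
--
--     if not isDivisible(gcd_a, arrayB):
--         if answer < gcd_a:
--             answer = gcd_a
--     if not isDivisible(gcd_b, arrayA):
--         if answer < gcd_b:
--             answer = gcd_b
--
--     return answer
-- ===== SOURCE B (Python) =====
-- def gcd(a, b):
--     while b:
--         a, b = b, a % b
--     return a
--
-- def solution(arrayA, arrayB):
--     ga = arrayA[0]
--     for x in arrayA[1:]:
--         ga = gcd(ga, x)
--     gb = arrayB[0]
--     for x in arrayB[1:]:
--         gb = gcd(gb, x)
--     cands = [g for g, other in ((ga, arrayB), (gb, arrayA))
--              if not any(num % g == 0 for num in other)]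
--     return max([0] + cands)
-- ===== Notes on version B (the rewrite author's own statement) =====
-- stated objective: idiomatic
-- what changed: Replaces the recursive gcd with the standard iterative Euclidean loop (while b: a, b = b, a % b), replaces the early-return isDivisible helper with any(), and replaces the mutable answer/two-if maximum with a comprehension of qualifying gcd candidates combined by max([0]+cands).
import Mathlib
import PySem

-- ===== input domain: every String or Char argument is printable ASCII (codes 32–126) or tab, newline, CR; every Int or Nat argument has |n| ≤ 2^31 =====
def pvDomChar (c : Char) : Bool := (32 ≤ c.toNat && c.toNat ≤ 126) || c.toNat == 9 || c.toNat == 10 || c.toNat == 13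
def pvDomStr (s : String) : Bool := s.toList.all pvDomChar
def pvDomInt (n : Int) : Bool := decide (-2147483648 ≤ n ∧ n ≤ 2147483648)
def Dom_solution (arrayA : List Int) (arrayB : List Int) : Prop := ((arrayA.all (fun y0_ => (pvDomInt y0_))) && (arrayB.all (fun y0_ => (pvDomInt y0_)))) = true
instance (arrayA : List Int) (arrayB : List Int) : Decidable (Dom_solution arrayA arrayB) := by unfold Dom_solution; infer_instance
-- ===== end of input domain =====

-- B replaces A's recursive gcd with the iterative Euclidean loop, isDivisible with any(),
-- and the mutable answer with max over a candidate comprehension; same cost, plainer code.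

-- termination helper for both gcd ports (Python's % strictly shrinks |divisor|)
theorem pvModNatAbsLt (a b : Int) (hb : ¬ b = 0) :
    (PySem.Int.mod a b).natAbs < b.natAbs := by
  rcases lt_trichotomy b 0 with h | h | h
  · have := PySem.Int.mod_neg_bounds a h
    omega
  · exact absurd h hb
  · have h1 := PySem.Int.mod_nonneg a h
    have h2 := PySem.Int.mod_lt a h
    omega

-- ===== PORT A =====
-- A's recursive gcd; 'if b = 0 then 0' only makes the Python ZeroDivisionError total (excluded by Pre_)
def pyGcdA (a b : Int) : Int :=
  if hb : b = 0 then 0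
  else if PySem.Int.mod a b = 0 then b
  else pyGcdA b (PySem.Int.mod a b)
termination_by b.natAbs
decreasing_by exact pvModNatAbsLt a b hb

def pyIsDivisible (g : Int) (arr : List Int) : Bool :=
  match arr with
  | [] => false
  | num :: t => if PySem.Int.mod num g == 0 then true else pyIsDivisible g t

def solution (arrayA : List Int) (arrayB : List Int) : Int :=
  let answer : Int := 0
  let gcd_a := PySem.List.pyGetD arrayA 0 0   -- arrayA[0]; default unreachable under Pre_
  let gcd_b := PySem.List.pyGetD arrayB 0 0
  let gcd_a := (PySem.List.pyRange 1 (PySem.List.len arrayA) 1).foldl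
      (fun g i => pyGcdA g (PySem.List.pyGetD arrayA i 0)) gcd_a
  let gcd_b := (PySem.List.pyRange 1 (PySem.List.len arrayB) 1).foldl
      (fun g i => pyGcdA g (PySem.List.pyGetD arrayB i 0)) gcd_b
  let answer := if ¬ pyIsDivisible gcd_a arrayB then (if answer < gcd_a then gcd_a else answer) else answer
  let answer := if ¬ pyIsDivisible gcd_b arrayA then (if answer < gcd_b then gcd_b else answer) else answer
  answer

-- ===== PORT B =====
-- B's iterative 'while b: a, b = b, a % b' loop, as the corresponding tail recursion
def gcdIter (a b : Int) : Int :=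
  if hb : b = 0 then a
  else gcdIter b (PySem.Int.mod a b)
termination_by b.natAbs
decreasing_by exact pvModNatAbsLt a b hb

def solution_alt (arrayA : List Int) (arrayB : List Int) : Int :=
  let ga := (PySem.List.slice arrayA (some 1) none).foldl gcdIter (PySem.List.pyGetD arrayA 0 0)
  let gb := (PySem.List.slice arrayB (some 1) none).foldl gcdIter (PySem.List.pyGetD arrayB 0 0)
  let cands := (([(ga, arrayB), (gb, arrayA)] : List (Int × List Int)).filter
      (fun p => !(p.2.any (fun num => PySem.Int.mod num p.1 == 0)))).map (fun p => p.1)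
  (PySem.List.max? ((0 : Int) :: cands) (fun y => y)).getD 0

-- ===== PRECONDITION & SPEC =====
-- Pre_ is exactly where the Python A returns: A raises IndexError on an empty array and
-- ZeroDivisionError when a gcd step or the divisibility test divides by 0 (a 0 in a tail,
-- or an array equal to [0]).
def Pre_solution (arrayA : List Int) (arrayB : List Int) : Prop :=
  arrayA ≠ [] ∧ arrayB ≠ [] ∧ (∀ x ∈ arrayA.tail, x ≠ 0) ∧ (∀ x ∈ arrayB.tail, x ≠ 0) ∧
  arrayA ≠ [0] ∧ arrayB ≠ [0]
instance (arrayA : List Int) (arrayB : List Int) : Decidable (Pre_solution arrayA arrayB) := by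
  unfold Pre_solution; infer_instance

def pvWitness_solution : List Int × List Int := ([10, 17], [5, 20])

def Spec_solution (arrayA : List Int) (arrayB : List Int) (out : Int) : Prop := out = solution_alt arrayA arrayB
instance (arrayA : List Int) (arrayB : List Int) (out : Int) : Decidable (Spec_solution arrayA arrayB out) := by unfold Spec_solution; infer_instance

-- ===== CLAIM (what is proved, stated in full; the proofs are below) =====
def Claim_equal_solution : Prop := ∀ (arrayA : List Int) (arrayB : List Int), Dom_solution arrayA arrayB → Pre_solution arrayA arrayB → Spec_solution arrayA arrayB (solution arrayA arrayB)

-- ===== LEMMAS AND PROOFS =====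

theorem gcd_eq_aux : ∀ (n : Nat) (a b : Int), b.natAbs ≤ n → b ≠ 0 → pyGcdA a b = gcdIter a b := by
  intro n
  induction n with
  | zero => intro a b hle hb; omega
  | succ n ih =>
    intro a b hle hb
    rw [pyGcdA, gcdIter, dif_neg hb, dif_neg hb]
    by_cases hm : PySem.Int.mod a b = 0
    · rw [if_pos hm, hm, gcdIter, dif_pos rfl]
    · rw [if_neg hm, ih b (PySem.Int.mod a b) (by have := pvModNatAbsLt a b hb; omega) hm]

theorem isDiv_eq_any (g : Int) (arr : List Int) :
    pyIsDivisible g arr = arr.any (fun num => PySem.Int.mod num g == 0) := by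
  induction arr with
  | nil => simp [pyIsDivisible]
  | cons h t ih => by_cases hm : PySem.Int.mod h g = 0 <;> simp [pyIsDivisible, hm, ih]

-- ===== VERDICT (by name: the statement is the Claim_ definition above) =====
theorem solution_eq (arrayA arrayB : List Int)
    (htA : ∀ x ∈ arrayA.tail, x ≠ 0) (htB : ∀ x ∈ arrayB.tail, x ≠ 0) :
    solution arrayA arrayB = solution_alt arrayA arrayB := by
  simp only [solution, solution_alt]
  rw [PySem.List.foldl_pyRange_pyGetD arrayA 0 pyGcdA _ (by norm_num : (0:Int) ≤ 1),
      PySem.List.foldl_pyRange_pyGetD arrayB 0 pyGcdA _ (by norm_num : (0:Int) ≤ 1),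
      PySem.List.slice_from_one, PySem.List.slice_from_one]
  simp only [Int.toNat_one, List.drop_one]
  rw [PySem.List.foldl_congr_mem arrayA.tail pyGcdA gcdIter _
        (fun acc x hx => gcd_eq_aux x.natAbs acc x le_rfl (htA x hx)),
      PySem.List.foldl_congr_mem arrayB.tail pyGcdA gcdIter _
        (fun acc x hx => gcd_eq_aux x.natAbs acc x le_rfl (htB x hx))]
  generalize arrayA.tail.foldl gcdIter (PySem.List.pyGetD arrayA 0 0) = ga
  generalize arrayB.tail.foldl gcdIter (PySem.List.pyGetD arrayB 0 0) = gb
  rw [isDiv_eq_any, isDiv_eq_any]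
  by_cases qa : arrayB.any (fun num => PySem.Int.mod num ga == 0) <;>
    by_cases qb : arrayA.any (fun num => PySem.Int.mod num gb == 0) <;>
      simp [qa, qb, List.filter, PySem.List.max?_id_cons, List.foldl, max_def] <;>
        split_ifs <;> omega

-- ===== VERDICT (by name: the statement is the Claim_ definition above) =====
theorem solution_spec : Claim_equal_solution := by
  intro arrayA arrayB _ hpre
  exact solution_eq arrayA arrayB hpre.2.2.1 hpre.2.2.2.1
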